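-- pv_equiv track=rewrite | github.com/PravinKanth/LeetCode | 2574-left-and-right-sum-differences/2574-left-and-right-sum-differences.py | leftRigthDifference
-- ===== SOURCE A (Python) =====
-- from typing import List
--
-- def leftRigthDifference(nums: List[int]) -> List[int]:
--     ls=0
--     rs=sum(nums)-nums[0]
--     i=0
--     ans=[abs(sum(nums)-nums[0]-0)]
--     for _ in range(len(nums)-1):
--         ls+=nums[i]
--         rs-=nums[i+1]
--         i+=1
--         ans.append(abs(ls-rs))
--     return ans
-- ===== SOURCE B (Python) =====
-- from typing import List
--
-- def leftRigthDifference(nums: List[int]) -> List[int]: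
--     total = sum(nums)
--     prefix = [0]
--     for x in nums:
--         prefix.append(prefix[-1] + x)
--     # left sum at i is prefix[i]; right sum is total - prefix[i] - nums[i]
--     return [abs(2 * prefix[i] + nums[i] - total) for i in range(len(nums))]
-- ===== Notes on version B (the rewrite author's own statement) =====
-- stated objective: simpler
-- what changed: Replaces A's single stateful loop that maintains running left and right sums, an index and an unrolled first element with a one-pass prefix-sum table followed by a per-index map computing abs(left minus right) from the table and the total.
import Mathlib
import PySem

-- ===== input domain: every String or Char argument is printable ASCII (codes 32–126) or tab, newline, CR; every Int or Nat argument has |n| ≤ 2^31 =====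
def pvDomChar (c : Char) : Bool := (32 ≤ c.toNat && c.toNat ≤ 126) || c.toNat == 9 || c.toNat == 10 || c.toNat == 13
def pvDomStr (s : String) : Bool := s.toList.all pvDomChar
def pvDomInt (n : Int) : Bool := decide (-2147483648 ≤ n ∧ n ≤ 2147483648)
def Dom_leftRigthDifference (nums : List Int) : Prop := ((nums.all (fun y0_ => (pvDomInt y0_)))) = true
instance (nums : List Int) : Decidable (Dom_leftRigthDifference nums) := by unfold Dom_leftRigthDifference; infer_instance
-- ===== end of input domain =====

-- B builds a prefix-sum table in one pass and then maps abs(left minus right) over the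
-- indices, instead of A's single loop with running left/right sums; same cost, simpler
-- decomposition. Equivalence is about the return value.

-- ===== PORT A =====
-- A reads the first element unconditionally (IndexError on the empty list); Pre_ excludes
-- the empty list, so the pyGetD default is never used there.
def leftRigthDifference (nums : List Int) : List Int :=
  let n0 : Int := PySem.List.pyGetD nums 0 0
  let s : Int := nums.sum
  let st := (PySem.List.pyRange 0 ((nums.length : Int) - 1) 1).foldl
    (fun st _ =>
      let ls := st.1 + PySem.List.pyGetD nums st.2.2.1 0
      let rs := st.2.1 - PySem.List.pyGetD nums (st.2.2.1 + 1) 0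
      let i := st.2.2.1 + 1
      (ls, rs, i, st.2.2.2 ++ [|ls - rs|]))
    ((0 : Int), s - n0, (0 : Int), ([|s - n0 - 0|] : List Int))
  st.2.2.2

-- ===== PORT B =====
def leftRigthDifference_alt (nums : List Int) : List Int :=
  let total : Int := nums.sum
  let pfx : List Int := nums.foldl (fun acc x => acc ++ [PySem.List.pyGetD acc (-1) 0 + x]) [0]
  (PySem.List.pyRange 0 (nums.length : Int) 1).map
    (fun i => |2 * PySem.List.pyGetD pfx i 0 + PySem.List.pyGetD nums i 0 - total|)

-- ===== PRECONDITION & SPEC =====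
-- A reads the first element unconditionally, so it raises IndexError on the empty list; Pre_ excludes exactly that input.
def Pre_leftRigthDifference (nums : List Int) : Prop := nums ≠ []
instance (nums : List Int) : Decidable (Pre_leftRigthDifference nums) := by unfold Pre_leftRigthDifference; infer_instance
def pvWitness_leftRigthDifference : List Int := [10, 4, 8, 3]

def Spec_leftRigthDifference (nums : List Int) (out : List Int) : Prop := out = leftRigthDifference_alt nums
instance (nums : List Int) (out : List Int) : Decidable (Spec_leftRigthDifference nums out) := by unfold Spec_leftRigthDifference; infer_instance

-- ===== CLAIM (what is proved, stated in full; the proofs are below) =====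
def Claim_equal_leftRigthDifference : Prop := ∀ (nums : List Int), Dom_leftRigthDifference nums → Pre_leftRigthDifference nums → Spec_leftRigthDifference nums (leftRigthDifference nums)

-- ===== LEMMAS AND PROOFS =====

-- the common value: index k ↦ |2 * (prefix sum up to k) + nums[k] - total|
def pvG (nums : List Int) (k : Nat) : Int :=
  |2 * (nums.take k).sum + nums.getD k 0 - nums.sum|

-- running partial sums of l starting from c (proof-side helper for B's prefix table)
def pvPsums (c : Int) : List Int → List Int
  | [] => []
  | x :: xs => (c + x) :: pvPsums (c + x) xs

lemma b_fold_eq (l : List Int) : ∀ (acc : List Int) (c : Int),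
    l.foldl (fun acc x => acc ++ [PySem.List.pyGetD acc (-1) 0 + x]) (acc ++ [c])
      = acc ++ c :: pvPsums c l := by
  induction l with
  | nil => intro acc c; simp [pvPsums]
  | cons x xs ih =>
    intro acc c
    simp only [List.foldl_cons, PySem.List.pyGetD_neg_one_append_singleton, pvPsums]
    have := ih (acc ++ [c]) (c + x)
    simpa using this

lemma pvPsums_getD (l : List Int) : ∀ (c : Int) (k : Nat), k < l.length →
    (pvPsums c l).getD k 0 = c + (l.take (k + 1)).sum := by
  induction l with
  | nil => intro c k h; simp at h
  | cons x xs ih =>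
    intro c k h
    cases k with
    | zero => simp [pvPsums]
    | succ k =>
      simp only [pvPsums, List.getD_cons_succ, List.take_succ_cons, List.sum_cons]
      rw [ih (c + x) k (by simpa using h)]
      ring

lemma sum_take_succ (l : List Int) (k : Nat) (h : k < l.length) :
    (l.take (k + 1)).sum = (l.take k).sum + l.getD k 0 := by
  rw [List.getD_eq_getElem?_getD]
  simp [List.getElem?_eq_getElem h, List.sum_take_succ l k h]

lemma alt_eq_map (nums : List Int) :
    leftRigthDifference_alt nums = (List.range nums.length).map (pvG nums) := by
  unfold leftRigthDifference_alt
  have hpfx : nums.foldl (fun acc x => acc ++ [PySem.List.pyGetD acc (-1) 0 + x]) [0]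
      = (0 : Int) :: pvPsums 0 nums := by
    simpa using b_fold_eq nums [] 0
  rw [hpfx, PySem.List.pyRange_zero_nat, List.map_map]
  apply List.map_congr_left
  intro k hk
  rw [List.mem_range] at hk
  simp only [Function.comp_apply, PySem.List.pyGetD_natCast, pvG]
  congr 2
  cases k with
  | zero => simp
  | succ k =>
    rw [List.getD_cons_succ, pvPsums_getD nums 0 k (by omega), zero_add]

-- A's loop state after m iterations (m ≤ n-1):
-- (left sum of first m, total - left sum of first m+1, m, answers for indices 0..m)
lemma a_fold_inv (nums : List Int) (hne : nums ≠ []) (m : Nat)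
    (hm : m ≤ nums.length - 1) :
    (PySem.List.pyRange 0 (m : Int) 1).foldl
      (fun st (_ : Int) =>
        let ls := st.1 + PySem.List.pyGetD nums st.2.2.1 0
        let rs := st.2.1 - PySem.List.pyGetD nums (st.2.2.1 + 1) 0
        let i := st.2.2.1 + 1
        (ls, rs, i, st.2.2.2 ++ [|ls - rs|]))
      ((0 : Int), nums.sum - PySem.List.pyGetD nums 0 0, (0 : Int),
        ([|nums.sum - PySem.List.pyGetD nums 0 0 - 0|] : List Int))
    = ((nums.take m).sum, nums.sum - (nums.take (m + 1)).sum, (m : Int),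
        (List.range (m + 1)).map (pvG nums)) := by
  have hlen : 1 ≤ nums.length := by
    cases nums with
    | nil => exact absurd rfl hne
    | cons a l => simp
  have h0 : PySem.List.pyGetD nums 0 0 = nums.getD 0 0 :=
    PySem.List.pyGetD_zero nums 0
  induction m with
  | zero =>
    rw [PySem.List.pyRange_zero_nat]
    simp only [Nat.cast_zero, List.range_zero, List.map_nil, List.foldl_nil,
      Prod.mk.injEq]
    rw [h0]
    refine ⟨by simp, by rw [sum_take_succ nums 0 (by omega)]; simp, by simp, ?_⟩
    simp [pvG, abs_sub_comm]
  | succ m ih =>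
    have hm' : m ≤ nums.length - 1 := by omega
    have hstep : (PySem.List.pyRange 0 ((m + 1 : Nat) : Int) 1)
        = PySem.List.pyRange 0 (m : Int) 1 ++ [(m : Int)] := by
      push_cast
      exact PySem.List.pyRange_one_succ_right (by positivity)
    rw [hstep, List.foldl_append, ih hm']
    simp only [List.foldl_cons, List.foldl_nil]
    have hmlt : m + 1 < nums.length := by omega
    have hgi : PySem.List.pyGetD nums ((m : Int)) 0 = nums.getD m 0 :=
      PySem.List.pyGetD_natCast nums m 0
    have hgi1 : PySem.List.pyGetD nums ((m : Int) + 1) 0 = nums.getD (m + 1) 0 := by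
      rw [show ((m : Int) + 1) = ((m + 1 : Nat) : Int) by push_cast; ring]
      exact PySem.List.pyGetD_natCast nums (m + 1) 0
    rw [hgi, hgi1]
    simp only [Prod.mk.injEq]
    refine ⟨?_, ?_, by push_cast; ring, ?_⟩
    · rw [sum_take_succ nums m (by omega)]
    · rw [sum_take_succ nums (m + 1) hmlt]; ring
    · rw [List.range_succ (n := m + 1), List.map_append]
      congr 1
      simp only [List.map_cons, List.map_nil, List.cons.injEq, and_true]
      simp only [pvG]
      rw [← sum_take_succ nums m (by omega)]
      congr 1
      ring

lemma a_eq_map (nums : List Int) (hne : nums ≠ []) :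
    leftRigthDifference nums = (List.range nums.length).map (pvG nums) := by
  unfold leftRigthDifference
  have hlen : 1 ≤ nums.length := by
    cases nums with
    | nil => exact absurd rfl hne
    | cons a l => simp
  have hcast : ((nums.length : Int) - 1) = ((nums.length - 1 : Nat) : Int) := by
    omega
  simp only [hcast]
  rw [a_fold_inv nums hne (nums.length - 1) le_rfl]
  have h2 : nums.length - 1 + 1 = nums.length := by omega
  rw [h2]

-- ===== VERDICT (by name: the statement is the Claim_ definition above) =====
theorem leftRigthDifference_spec : Claim_equal_leftRigthDifference := by
  intro nums _ hpre
  unfold Spec_leftRigthDifference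
  rw [a_eq_map nums hpre, alt_eq_map nums]
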